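-- pv_equiv track=rewrite | github.com/981377660LMT/algorithm-study | 1_stack/连续相邻元素消除问题/三种颜色转换.py | solve
-- ===== SOURCE A (Python) =====
-- mapping = {"R": 1, "G": 2, "B": 3}
--
-- def solve(colors):
--     n = len(colors)
--     if len(set(colors)) == 1:
--         return n
--     if n <= 1:
--         return n
--
--     curXor = 0
--     for i in range(n):
--         curXor ^= mapping[colors[i]]
--     return 2 if curXor == 0 else 1
-- ===== SOURCE B (Python) =====
-- def solve(colors):
--     n = len(colors)
--     if n <= 1 or colors == colors[0] * n:
--         return n
--     r, g, b = colors.count("R"), colors.count("G"), colors.count("B")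
--     return 2 if r % 2 == g % 2 == b % 2 else 1
-- ===== Notes on version B (the rewrite author's own statement) =====
-- stated objective: alternative
-- what changed: Replaces A's set construction and per-element dict-lookup XOR scan by a monochrome test (string-repetition comparison) plus three str.count passes and a parity-equality test (the XOR of 1,2,3 weighted by parities is zero exactly when the three count parities coincide), removing the mapping dict and XOR entirely.
-- outside the precondition, e.g. on solve('RX'): A raises KeyError, B returns 1
import Mathlib
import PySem

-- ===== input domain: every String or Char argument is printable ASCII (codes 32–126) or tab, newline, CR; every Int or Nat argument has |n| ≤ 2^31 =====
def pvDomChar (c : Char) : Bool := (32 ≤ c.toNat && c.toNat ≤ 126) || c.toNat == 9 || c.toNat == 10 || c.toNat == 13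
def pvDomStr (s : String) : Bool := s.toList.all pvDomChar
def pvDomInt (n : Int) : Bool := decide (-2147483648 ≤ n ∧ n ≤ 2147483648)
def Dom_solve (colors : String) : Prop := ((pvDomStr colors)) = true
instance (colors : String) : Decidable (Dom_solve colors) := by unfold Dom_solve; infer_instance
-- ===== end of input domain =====

-- B replaces A's set-building plus per-element dict-lookup XOR scan by a monochrome test
-- (string-repetition comparison), three count passes, and a parity-equality test
-- (objective: alternative).

-- ===== PORT A =====
-- mapping = {"R": 1, "G": 2, "B": 3}; the 1-character Python string keys are modelled as Char
def pvMapping : PySem.Dict Char Int := PySem.Dict.ofList [('R', 1), ('G', 2), ('B', 3)]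

def solve (colors : String) : Int :=
  let l := colors.toList
  let n : Int := l.length
  if (PySem.Set.ofList l).length = 1 then n
  else if n ≤ 1 then n
  else
    -- mapping[colors[i]]: KeyError (get? = none) is excluded by Pre_solve; getD totalizes
    let curXor := (PySem.List.pyRange 0 n 1).foldl
      (fun acc i => PySem.Int.bxor acc (pvMapping.getD (PySem.List.pyGetD l i ' ') 0)) 0
    if curXor = 0 then 2 else 1

-- ===== PORT B =====
def solve_alt (colors : String) : Int :=
  let l := colors.toList
  let n : Int := l.length
  if n ≤ 1 then n
  -- colors == colors[0] * n  (n ≥ 1 here, so colors[0] is in range; '*' is string repetition)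
  else if l = PySem.List.pyRepeat [PySem.List.pyGetD l 0 ' '] n then n
  else
    let r : Int := PySem.Str.count colors "R"
    let g : Int := PySem.Str.count colors "G"
    let b : Int := PySem.Str.count colors "B"
    if r % 2 = g % 2 ∧ g % 2 = b % 2 then 2 else 1

-- ===== PRECONDITION & SPEC =====
-- Pre_ excludes exactly the inputs on which A raises KeyError: strings with at least two distinct
-- characters that contain a character outside "RGB" (A returns on every other string).
def Pre_solve (colors : String) : Prop :=
  (colors.toList.all (fun c => c == 'R' || c == 'G' || c == 'B')
    || colors.toList.all (fun c => colors.toList.all (fun c' => c == c'))) = true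
instance (colors : String) : Decidable (Pre_solve colors) := by unfold Pre_solve; infer_instance

def pvWitness_solve : String := "RGB"

def Spec_solve (colors : String) (out : Int) : Prop := out = solve_alt colors
instance (colors : String) (out : Int) : Decidable (Spec_solve colors out) := by unfold Spec_solve; infer_instance

-- ===== CLAIM (what is proved, stated in full; the proofs are below) =====
def Claim_equal_solve : Prop := ∀ (colors : String), Dom_solve colors → Pre_solve colors → Spec_solve colors (solve colors)

-- ===== LEMMAS AND PROOFS =====

-- Nat-valued version of the mapping (0 outside the keys), used only by the proofs
def pvNval (c : Char) : Nat := if c = 'R' then 1 else if c = 'G' then 2 else if c = 'B' then 3 else 0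

theorem pvMapping_getD (c : Char) : pvMapping.getD c 0 = (pvNval c : Int) := by
  unfold pvNval
  by_cases h1 : c = 'R'
  · subst h1; decide
  · by_cases h2 : c = 'G'
    · subst h2; decide
    · by_cases h3 : c = 'B'
      · subst h3; decide
      · simp only [h1, h2, h3, if_false, Nat.cast_zero]
        simp [pvMapping, PySem.Dict.ofList, PySem.Dict.update, PySem.Dict.insert,
          PySem.Dict.empty, PySem.Dict.get?, PySem.Dict.getD, List.foldl,
          beq_iff_eq, Ne.symm h1, Ne.symm h2, Ne.symm h3]

-- the A-side XOR loop over Int is the cast of the same loop over Nat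
theorem pvBxor_fold (l : List Char) (m : Nat) :
    l.foldl (fun acc c => PySem.Int.bxor acc (pvMapping.getD c 0)) (m : Int)
      = ((l.foldl (fun acc c => acc ^^^ pvNval c) m : Nat) : Int) := by
  induction l generalizing m with
  | nil => rfl
  | cons c t ih =>
    simp only [List.foldl_cons, pvMapping_getD, PySem.Int.bxor_natCast] at ih ⊢
    exact ih (m ^^^ pvNval c)

-- pull the accumulator out of a Nat XOR fold
theorem pvXor_fold_shift (l : List Char) (a : Nat) :
    l.foldl (fun acc c => acc ^^^ pvNval c) a = a ^^^ l.foldl (fun acc c => acc ^^^ pvNval c) 0 := by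
  induction l generalizing a with
  | nil => simp
  | cons c t ih =>
    simp only [List.foldl_cons]
    rw [ih (a ^^^ pvNval c), ih (0 ^^^ pvNval c), Nat.zero_xor, Nat.xor_assoc]

-- XOR over the whole list equals the XOR of the odd-count colors (parity form)
theorem pvXor_parity (l : List Char) (h : ∀ c ∈ l, c = 'R' ∨ c = 'G' ∨ c = 'B') :
    l.foldl (fun acc c => acc ^^^ pvNval c) 0
      = (l.count 'R' % 2) ^^^ ((l.count 'G' % 2) * 2) ^^^ ((l.count 'B' % 2) * 3) := by
  induction l with
  | nil => rfl
  | cons c t ih =>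
    have ht := ih (fun x hx => h x (List.mem_cons_of_mem c hx))
    simp only [List.foldl_cons, Nat.zero_xor]
    rw [pvXor_fold_shift, ht]
    have hr2 := Nat.mod_two_eq_zero_or_one (t.count 'R')
    have hg2 := Nat.mod_two_eq_zero_or_one (t.count 'G')
    have hb2 := Nat.mod_two_eq_zero_or_one (t.count 'B')
    rcases h c (List.mem_cons_self) with hc | hc | hc <;> subst hc <;>
      simp only [List.count_cons, beq_iff_eq, Char.reduceEq, if_true, if_false, reduceIte,
        Nat.add_zero] <;>
      [ (have h1 : (t.count 'R' + 1) % 2 = 1 - t.count 'R' % 2 := by omega);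
        (have h1 : (t.count 'G' + 1) % 2 = 1 - t.count 'G' % 2 := by omega);
        (have h1 : (t.count 'B' + 1) % 2 = 1 - t.count 'B' % 2 := by omega) ] <;>
      rw [h1] <;>
      rcases hr2 with hr | hr <;> rcases hg2 with hg | hg <;> rcases hb2 with hb | hb <;>
      rw [hr, hg, hb] <;> decide

-- str.count with a single-character needle is List.count (fuel-indexed helper first)
theorem pvCountGo_single (c : Char) (fuel : Nat) (l : List Char) (acc : Nat) (h : l.length ≤ fuel) :
    PySem.Chars.count.go [c] fuel l acc = acc + l.count c := by
  induction fuel generalizing l acc with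
  | zero =>
    have : l = [] := List.eq_nil_of_length_eq_zero (Nat.le_zero.1 h)
    subst this; simp [PySem.Chars.count.go]
  | succ n ih =>
    cases l with
    | nil => simp [PySem.Chars.count.go]
    | cons x t =>
      rw [PySem.Chars.count.go]
      have hlen : t.length ≤ n := by simp at h; omega
      by_cases hx : x = c
      · subst hx
        simp only [List.isPrefixOf, BEq.rfl, Bool.true_and, if_pos, List.length_cons,
          List.drop_succ_cons, List.length_nil, List.drop_zero]
        rw [ih t (acc + 1) hlen]
        simp
        omega
      · have hb : List.isPrefixOf [c] (x :: t) = false := by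
          simp [List.isPrefixOf]
          intro he; exact absurd he.symm hx
        rw [hb, if_neg (by simp), ih t acc hlen]
        simp [hx]

theorem pvCount_single (c : Char) (l : List Char) : PySem.Chars.count l [c] = l.count c := by
  simp only [PySem.Chars.count, List.isEmpty_cons, if_false, Bool.false_eq_true]
  rw [pvCountGo_single c l.length l 0 le_rfl, Nat.zero_add]

-- a list whose elements all equal its head has singleton set
theorem pvFoldl_add_subset (l : List Char) (s : PySem.Set Char) (h : ∀ x ∈ l, x ∈ s) :
    l.foldl PySem.Set.add s = s := by
  induction l with
  | nil => rfl
  | cons c t ih =>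
    simp only [List.foldl_cons]
    rw [PySem.Set.add_of_mem (h c (List.mem_cons_self))]
    exact ih (fun x hx => h x (List.mem_cons_of_mem c hx))

theorem pvSet_const (a : Char) (l : List Char) (h : ∀ x ∈ l, x = a) :
    PySem.Set.ofList (a :: l) = [a] := by
  rw [PySem.Set.ofList_eq_foldl]
  simp only [List.foldl_cons]
  have : PySem.Set.add [] a = [a] := rfl
  rw [this]
  exact pvFoldl_add_subset l [a] (fun x hx => by simp [h x hx])

theorem pvSet_len_one (l : List Char) (h : (PySem.Set.ofList l).length = 1) :
    ∀ x ∈ l, ∀ y ∈ l, x = y := by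
  intro x hx y hy
  rcases e : PySem.Set.ofList l with _ | ⟨z, t⟩
  · rw [e] at h; simp at h
  · have ht : t = [] := by rw [e] at h; simpa using h
    subst ht
    have hx' : x ∈ PySem.Set.ofList l := (PySem.Set.mem_ofList l x).2 hx
    have hy' : y ∈ PySem.Set.ofList l := (PySem.Set.mem_ofList l y).2 hy
    rw [e] at hx' hy'
    simp at hx' hy'
    rw [hx', hy']

-- all-equal-to-head characterised by the repetition comparison B makes
theorem pvReplicate_iff (a : Char) (l : List Char) :
    a :: l = List.replicate (a :: l).length a ↔ ∀ x ∈ l, x = a := by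
  constructor
  · intro h x hx
    have := List.eq_of_mem_replicate (h ▸ List.mem_cons_of_mem a hx)
    exact this
  · intro h
    simp only [List.length_cons, List.replicate_succ, List.cons.injEq, true_and]
    exact List.eq_replicate_iff.2 ⟨rfl, h⟩

-- ===== VERDICT (by name: the statement is the Claim_ definition above) =====
theorem solve_spec : Claim_equal_solve := by
  intro colors _ hpre
  unfold Spec_solve solve solve_alt Pre_solve at *
  rw [Bool.or_eq_true] at hpre
  simp only [List.all_eq_true, Bool.or_eq_true, beq_iff_eq] at hpre
  rcases e : colors.toList with _ | ⟨a, rest⟩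
  · simp [e]
  · rw [e] at hpre; dsimp only
    have hrep : PySem.List.pyRepeat [PySem.List.pyGetD (a :: rest) 0 ' '] ((a :: rest).length : Int)
        = List.replicate (a :: rest).length a := by
      rw [PySem.List.pyGetD_zero_cons, PySem.List.pyRepeat_singleton]
      simp
    by_cases hall : ∀ x ∈ rest, x = a
    · -- all characters equal: A takes the set-size-1 branch, B the n ≤ 1 or the repetition branch
      have hset : PySem.Set.ofList (a :: rest) = [a] := pvSet_const a rest hall
      rw [if_pos (show (PySem.Set.ofList (a :: rest)).length = 1 from by rw [hset]; rfl)]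
      by_cases h1 : (((a :: rest).length : Int)) ≤ 1
      · rw [if_pos h1]
      · rw [if_neg h1, hrep, if_pos ((pvReplicate_iff a rest).2 hall)]
    · -- at least two distinct characters: A's XOR loop vs B's parity-equality test
      push_neg at hall
      obtain ⟨x, hx, hxa⟩ := hall
      have hrest : rest ≠ [] := by rintro rfl; simp at hx
      have hlen : 1 ≤ rest.length := List.length_pos_iff.2 hrest
      have hn : ¬ (((a :: rest).length : Int) ≤ 1) := by
        simp only [List.length_cons]; push_cast; omega
      have hset : ¬ ((PySem.Set.ofList (a :: rest)).length = 1) := by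
        intro h
        exact hxa (pvSet_len_one _ h x (List.mem_cons_of_mem a hx) a List.mem_cons_self)
      have hB : ¬ (a :: rest = PySem.List.pyRepeat [PySem.List.pyGetD (a :: rest) 0 ' ']
          ((a :: rest).length : Int)) := by
        rw [hrep]
        intro h
        exact hxa ((pvReplicate_iff a rest).1 h x hx)
      have hRGB : ∀ c ∈ a :: rest, c = 'R' ∨ c = 'G' ∨ c = 'B' := by
        rcases hpre with h | h
        · intro c hc; rcases h c hc with (h' | h') | h' <;> tauto
        · exact absurd (h x (List.mem_cons_of_mem a hx) a List.mem_cons_self) hxa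
      simp only [if_neg hset, if_neg hn, if_neg hB]
      -- A side: range fold → list fold → Nat fold → parity formula
      rw [PySem.List.foldl_pyRange_zero_pyGetD' (a :: rest) ' '
            (fun acc c => PySem.Int.bxor acc (pvMapping.getD c 0)) 0]
      have hA := pvBxor_fold (a :: rest) 0
      simp only [Nat.cast_zero] at hA
      rw [hA, pvXor_parity (a :: rest) hRGB]
      -- B side: str.count "R" = List.count 'R', condition ↔ xor-zero
      have hcnt : ∀ (st : String) (c : Char), st.toList = [c] →
          (PySem.Str.count colors st : Int) = ((a :: rest).count c : Int) := by
        intro st c hst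
        rw [PySem.Str.count_eq, hst, e, pvCount_single]
      rw [hcnt "R" 'R' (by decide), hcnt "G" 'G' (by decide), hcnt "B" 'B' (by decide)]
      set pr := (a :: rest).count 'R' with hpr
      set pg := (a :: rest).count 'G' with hpg
      set pb := (a :: rest).count 'B' with hpb
      have hmod : ∀ m : Nat, ((m : Int)) % 2 = ((m % 2 : Nat) : Int) := fun m =>
        (Int.natCast_mod m 2).symm
      rw [hmod pr, hmod pg, hmod pb]
      have hiff : (((pr % 2) ^^^ (pg % 2) * 2 ^^^ (pb % 2) * 3 : Nat) : Int) = 0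
          ↔ (((pr % 2 : Nat) : Int) = ((pg % 2 : Nat) : Int)
              ∧ ((pg % 2 : Nat) : Int) = ((pb % 2 : Nat) : Int)) := by
        rw [Int.natCast_eq_zero, Nat.cast_inj, Nat.cast_inj]
        rcases Nat.mod_two_eq_zero_or_one pr with h1 | h1 <;>
          rcases Nat.mod_two_eq_zero_or_one pg with h2 | h2 <;>
          rcases Nat.mod_two_eq_zero_or_one pb with h3 | h3 <;>
          rw [h1, h2, h3] <;> decide
      exact if_congr hiff rfl rfl
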